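-- pv_equiv track=rewrite | github.com/Yidhar/Embla_System | apiserver/context_compressor.py | _split_into_loops
-- ===== SOURCE A (Python) =====
-- from typing import Dict, List, Optional, Tuple
--
-- def _split_into_loops(messages: List[Dict], start_idx: int) -> List[List[Dict]]:
--     """将消息按 loop 切分。
--
--     一个 loop = 一条 user 消息 + 后续所有非 user 消息（assistant / tool / system 等），
--     直到下一条 user 消息。开头没有 user 的连续消息也归为一个 loop。
--     """
--     loops: List[List[Dict]] = []
--     current: List[Dict] = []
--
--     for msg in messages[start_idx:]:
--         if msg.get("role") == "user":
--             if current: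
--                 loops.append(current)
--             current = [msg]
--         else:
--             current.append(msg)
--
--     if current:
--         loops.append(current)
--
--     return loops
-- ===== SOURCE B (Python) =====
-- def _split_into_loops(messages, start_idx):
--     sub = messages[start_idx:]
--     n = len(sub)
--     loops = []
--     i = 0
--     while i < n:
--         j = i + 1
--         while j < n and sub[j].get("role") != "user":
--             j += 1
--         loops.append(sub[i:j])
--         i = j
--     return loops
-- ===== Notes on version B (the rewrite author's own statement) =====
-- stated objective: alternative
-- what changed: Replaces A's running-accumulator fold (loops/current with a trailing flush) by a two-pointer cut-point scan that emits each loop as the slice sub[i:j] up to the next 'user' index.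
import Mathlib
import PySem

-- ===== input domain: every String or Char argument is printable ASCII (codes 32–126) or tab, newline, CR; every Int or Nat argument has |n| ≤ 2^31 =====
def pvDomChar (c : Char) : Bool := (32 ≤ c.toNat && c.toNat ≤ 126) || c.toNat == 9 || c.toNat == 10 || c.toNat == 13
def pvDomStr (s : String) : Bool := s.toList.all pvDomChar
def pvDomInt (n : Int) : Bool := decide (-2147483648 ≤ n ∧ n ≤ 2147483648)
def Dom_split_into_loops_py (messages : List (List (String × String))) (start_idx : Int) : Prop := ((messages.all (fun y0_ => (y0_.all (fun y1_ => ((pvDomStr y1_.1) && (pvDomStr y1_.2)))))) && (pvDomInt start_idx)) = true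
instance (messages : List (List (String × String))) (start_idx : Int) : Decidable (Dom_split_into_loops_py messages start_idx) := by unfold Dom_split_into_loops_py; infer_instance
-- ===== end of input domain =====

-- B is an alternative decomposition (two-pointer cut-point scan emitting slices) replacing A's
-- running-accumulator fold; same O(n) cost, return value proved identical on all inputs.

-- msg.get("role") == "user" (shared lookup, identical in both Pythons)
def pvIsUser (m : List (String × String)) : Bool :=
  (PySem.Dict.ofList m).get? "role" == some "user"

-- ===== PORT A =====
-- loop body of A: (loops, current) updated per message
def pvStep (st : List (List (List (String × String))) × List (List (String × String)))
    (msg : List (String × String)) :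
    List (List (List (String × String))) × List (List (String × String)) :=
  if pvIsUser msg then
    (if st.2 ≠ [] then st.1 ++ [st.2] else st.1, [msg])
  else
    (st.1, st.2 ++ [msg])

-- trailing 'if current: loops.append(current)'
def pvFinish (st : List (List (List (String × String))) × List (List (String × String))) :
    List (List (List (String × String))) :=
  if st.2 ≠ [] then st.1 ++ [st.2] else st.1

def split_into_loops_py (messages : List (List (String × String))) (start_idx : Int) :
    List (List (List (String × String))) :=
  let sub := PySem.List.slice messages (some start_idx) none
  pvFinish (sub.foldl pvStep ([], []))

-- ===== PORT B =====
-- inner while: advance j to the next 'user' index (or n)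
def pvCut (sub : List (List (String × String))) (n j : Nat) : Nat :=
  if j < n ∧ ¬ pvIsUser (sub.getD j []) then pvCut sub n (j + 1) else j
termination_by n - j
decreasing_by omega

theorem pvCut_ge (sub : List (List (String × String))) (n j : Nat) : j ≤ pvCut sub n j := by
  unfold pvCut
  split
  · exact le_trans (by omega) (pvCut_ge sub n (j + 1))
  · exact le_refl j
termination_by n - j
decreasing_by omega

-- outer while: emit sub[i:j] and continue at j
def pvLoop (sub : List (List (String × String))) (n i : Nat) : List (List (List (String × String))) :=
  if i < n then
    let j := pvCut sub n (i + 1)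
    PySem.List.slice sub (some (i : Int)) (some (j : Int)) :: pvLoop sub n j
  else []
termination_by n - i
decreasing_by
  have := pvCut_ge sub n (i + 1)
  omega

def split_into_loops_py_alt (messages : List (List (String × String))) (start_idx : Int) :
    List (List (List (String × String))) :=
  let sub := PySem.List.slice messages (some start_idx) none
  pvLoop sub sub.length 0

-- ===== PRECONDITION & SPEC =====
def Spec_split_into_loops_py (messages : List (List (String × String))) (start_idx : Int) (out : List (List (List (String × String)))) : Prop := out = split_into_loops_py_alt messages start_idx
instance (messages : List (List (String × String))) (start_idx : Int) (out : List (List (List (String × String)))) : Decidable (Spec_split_into_loops_py messages start_idx out) := by unfold Spec_split_into_loops_py; infer_instance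

-- ===== CLAIM (what is proved, stated in full; the proofs are below) =====
def Claim_equal_split_into_loops_py : Prop := ∀ (messages : List (List (String × String))) (start_idx : Int), Dom_split_into_loops_py messages start_idx → Spec_split_into_loops_py messages start_idx (split_into_loops_py messages start_idx)

-- ===== LEMMAS AND PROOFS =====

-- common recursive characterisation both ports are reduced to
def pvGsplit : List (List (String × String)) → List (List (List (String × String)))
  | [] => []
  | x :: t =>
      (x :: t.takeWhile (fun m => !pvIsUser m)) :: pvGsplit (t.dropWhile (fun m => !pvIsUser m))
termination_by l => l.length
decreasing_by
  have := List.length_dropWhile_le (fun m => !pvIsUser m) t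
  simp only [List.length_cons]
  omega

theorem pvFlush (xs : List (List (String × String)))
    (L : List (List (List (String × String)))) (C : List (List (String × String))) :
    pvFinish (xs.foldl pvStep (L, C)) = L ++ pvFinish (xs.foldl pvStep ([], C)) := by
  induction xs generalizing L C with
  | nil =>
      simp only [List.foldl_nil, pvFinish]
      split_ifs <;> simp
  | cons m t ih =>
      simp only [List.foldl_cons, pvStep]
      by_cases hu : pvIsUser m
      · rw [if_pos hu, if_pos hu]
        rw [ih (if C ≠ [] then L ++ [C] else L) [m],
            ih (if C ≠ [] then [] ++ [C] else []) [m]]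
        split_ifs <;> simp
      · rw [if_neg hu, if_neg hu]
        exact ih L (C ++ [m])

theorem pvFoldChar (xs : List (List (String × String))) (C : List (List (String × String)))
    (hC : C ≠ []) :
    pvFinish (xs.foldl pvStep ([], C)) =
      (C ++ xs.takeWhile (fun m => !pvIsUser m)) ::
        pvGsplit (xs.dropWhile (fun m => !pvIsUser m)) := by
  induction xs generalizing C with
  | nil => simp [pvFinish, pvGsplit, hC]
  | cons m t ih =>
      simp only [List.foldl_cons, pvStep]
      by_cases hu : pvIsUser m
      · rw [if_pos hu, if_pos hC, List.nil_append]
        rw [pvFlush, ih [m] (by simp)]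
        simp [hu, pvGsplit]
      · rw [if_neg hu]
        rw [ih (C ++ [m]) (by simp)]
        simp [hu, List.append_assoc]

theorem pvA_eq_gsplit (xs : List (List (String × String))) :
    pvFinish (xs.foldl pvStep ([], [])) = pvGsplit xs := by
  cases xs with
  | nil => simp [pvFinish, pvGsplit]
  | cons m t =>
      simp only [List.foldl_cons, pvStep]
      by_cases hu : pvIsUser m
      · rw [if_pos hu, if_neg (by simp)]
        rw [pvFoldChar t [m] (by simp)]
        simp [pvGsplit]
      · rw [if_neg hu, List.nil_append]
        rw [pvFoldChar t [m] (by simp)]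
        simp [pvGsplit]

theorem pvTake_takeWhile {α : Type} (p : α → Bool) (l : List α) :
    l.take (l.takeWhile p).length = l.takeWhile p := by
  induction l with
  | nil => simp
  | cons x t ih =>
      by_cases h : p x
      · simp [h, ih]
      · simp [h]

theorem pvDrop_takeWhile {α : Type} (p : α → Bool) (l : List α) :
    l.drop (l.takeWhile p).length = l.dropWhile p := by
  induction l with
  | nil => simp
  | cons x t ih =>
      by_cases h : p x
      · simp [List.dropWhile_cons, h, ih]
      · simp [List.dropWhile_cons, h]

theorem pvLen_takeWhile {α : Type} (p : α → Bool) (l : List α) :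
    (l.takeWhile p).length ≤ l.length := by
  induction l with
  | nil => simp
  | cons x t ih =>
      by_cases h : p x
      · simp only [List.takeWhile_cons, h, if_true, List.length_cons]
        omega
      · simp [h]

theorem pvCut_char (sub : List (List (String × String))) (j : Nat) (hj : j ≤ sub.length) :
    pvCut sub sub.length j = j + ((sub.drop j).takeWhile (fun m => !pvIsUser m)).length := by
  unfold pvCut
  split
  · rename_i h
    obtain ⟨hlt, hnu⟩ := h
    have hd : sub.drop j = sub[j] :: sub.drop (j + 1) := List.drop_eq_getElem_cons hlt
    have hget : sub.getD j [] = sub[j] := List.getD_eq_getElem sub [] hlt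
    rw [pvCut_char sub (j + 1) (by omega)]
    rw [hd, List.takeWhile_cons]
    simp only [hget] at hnu
    simp [hnu]
    omega
  · rename_i h
    by_cases hlt : j < sub.length
    · have hd : sub.drop j = sub[j] :: sub.drop (j + 1) := List.drop_eq_getElem_cons hlt
      have hget : sub.getD j [] = sub[j] := List.getD_eq_getElem sub [] hlt
      have hu : pvIsUser sub[j] = true := by
        by_contra hnu
        exact h ⟨hlt, by rw [hget]; exact hnu⟩
      rw [hd, List.takeWhile_cons]
      simp [hu]
    · have : sub.drop j = [] := List.drop_eq_nil_of_le (by omega)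
      simp [this]
termination_by sub.length - j
decreasing_by omega

theorem pvB_eq_gsplit (sub : List (List (String × String))) (i : Nat) (hi : i ≤ sub.length) :
    pvLoop sub sub.length i = pvGsplit (sub.drop i) := by
  rw [pvLoop]
  split
  · rename_i hlt
    show PySem.List.slice sub (some (i : Int)) (some ((pvCut sub sub.length (i + 1) : Nat) : Int)) ::
        pvLoop sub sub.length (pvCut sub sub.length (i + 1)) = pvGsplit (sub.drop i)
    have hd : sub.drop i = sub[i] :: sub.drop (i + 1) := List.drop_eq_getElem_cons hlt
    set K := ((sub.drop (i + 1)).takeWhile (fun m => !pvIsUser m)).length with hK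
    have hKle : K ≤ sub.length - (i + 1) := by
      have h1 := pvLen_takeWhile (fun m => !pvIsUser m) (sub.drop (i + 1))
      simp only [List.length_drop] at h1
      omega
    have hcut : pvCut sub sub.length (i + 1) = (i + 1) + K :=
      pvCut_char sub (i + 1) (by omega)
    rw [hcut, pvB_eq_gsplit sub ((i + 1) + K) (by omega)]
    have hslice :
        PySem.List.slice sub (some (i : Int)) (some (((i + 1) + K : Nat) : Int)) =
          sub[i] :: (sub.drop (i + 1)).takeWhile (fun m => !pvIsUser m) := by
      rw [PySem.List.slice_natCast]
      rw [hd]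
      have h2 : (i + 1) + K - i = K + 1 := by omega
      rw [h2, List.take_succ_cons]
      rw [hK, pvTake_takeWhile]
    have hdrop : sub.drop ((i + 1) + K) = (sub.drop (i + 1)).dropWhile (fun m => !pvIsUser m) := by
      rw [← pvDrop_takeWhile (fun m => !pvIsUser m) (sub.drop (i + 1)), ← hK, List.drop_drop]
    rw [hslice, hdrop, hd]
    rw [pvGsplit]
  · rename_i hge
    have h0 : sub.drop i = [] := List.drop_eq_nil_of_le (by omega)
    simp [h0, pvGsplit]
termination_by sub.length - i
decreasing_by
  have := pvCut_ge sub sub.length (i + 1)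
  omega

-- ===== VERDICT (by name: the statement is the Claim_ definition above) =====
theorem split_into_loops_py_spec : Claim_equal_split_into_loops_py := by
  intro messages start_idx _
  unfold Spec_split_into_loops_py split_into_loops_py split_into_loops_py_alt
  simp only []
  rw [pvA_eq_gsplit, pvB_eq_gsplit _ 0 (by omega), List.drop_zero]
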